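-- pv_equiv track=rewrite | github.com/virup/leetcode | patterns/02_sliding_window_on_strings/problems/424_Longest_Repeating_Character_Replacement.py | allMoreThanK
-- ===== SOURCE A (Python) =====
-- def allMoreThanK(m, k):
--     # We consider the fixed character to be the "key"
--     for key in m:
--         count = 0
--         for key2 in m:
--             if key == key2:
--                 continue
--             # we sum all the chars which are not "key"
--             count += m[key2]
--         if count <= k:
--             return False
--     return True
-- ===== SOURCE B (Python) =====
-- def allMoreThanK(m, k):
--     total = sum(m.values())
--     return all(total - v > k for v in m.values())
-- ===== Notes on version B (the rewrite author's own statement) =====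
-- stated objective: faster
-- what changed: Replaces the nested loop (re-summing all other keys' counts for every key) by one precomputed total of all values followed by a single all() pass checking total - v > k.
import Mathlib
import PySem

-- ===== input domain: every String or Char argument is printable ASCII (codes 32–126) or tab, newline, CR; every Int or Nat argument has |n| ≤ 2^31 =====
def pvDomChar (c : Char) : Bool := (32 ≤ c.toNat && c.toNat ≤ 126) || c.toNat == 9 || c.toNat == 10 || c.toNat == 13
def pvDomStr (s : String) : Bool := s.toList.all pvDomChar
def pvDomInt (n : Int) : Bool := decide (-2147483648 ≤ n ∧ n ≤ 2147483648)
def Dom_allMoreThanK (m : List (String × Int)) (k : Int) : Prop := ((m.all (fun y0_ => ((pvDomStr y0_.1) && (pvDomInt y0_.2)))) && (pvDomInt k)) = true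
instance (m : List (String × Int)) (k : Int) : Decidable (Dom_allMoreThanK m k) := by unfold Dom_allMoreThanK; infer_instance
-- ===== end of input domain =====

-- B precomputes the total of all counts once and makes a single pass checking total - v > k,
-- instead of A's nested re-summation per key (measured faster: O(n) vs O(n^2)).
-- The dict parameter m arrives as an association list; both ports read it through
-- PySem.Dict.ofList, which is exactly Python's dict construction (last value wins,
-- first insertion position kept), so no precondition is needed.

-- ===== PORT A =====
-- inner loop: count = 0; for key2 in m: if key == key2: continue; count += m[key2]
def aInner (d : PySem.Dict String Int) (key : String) : Int :=
  d.keys.foldl (fun count key2 => if key == key2 then count else count + d.getD key2 0) 0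

-- outer loop with early return False
def aLoop (d : PySem.Dict String Int) (k : Int) : List String → Bool
  | [] => true
  | key :: rest => if aInner d key ≤ k then false else aLoop d k rest

def allMoreThanK (m : List (String × Int)) (k : Int) : Bool :=
  let d := PySem.Dict.ofList m
  aLoop d k d.keys

-- ===== PORT B =====
-- total = sum(m.values()); return all(total - v > k for v in m.values())
def allMoreThanK_alt (m : List (String × Int)) (k : Int) : Bool :=
  let vals := (PySem.Dict.ofList m).values
  let total := vals.foldl (· + ·) 0
  vals.all (fun v => decide (total - v > k))

-- ===== PRECONDITION & SPEC =====
def Spec_allMoreThanK (m : List (String × Int)) (k : Int) (out : Bool) : Prop := out = allMoreThanK_alt m k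
instance (m : List (String × Int)) (k : Int) (out : Bool) : Decidable (Spec_allMoreThanK m k out) := by unfold Spec_allMoreThanK; infer_instance

-- ===== CLAIM (what is proved, stated in full; the proofs are below) =====
def Claim_equal_allMoreThanK : Prop := ∀ (m : List (String × Int)) (k : Int), Dom_allMoreThanK m k → Spec_allMoreThanK m k (allMoreThanK m k)

-- ===== LEMMAS AND PROOFS =====

-- A's inner foldl written as a sum of per-key terms
theorem aInner_foldl_sum (g : String → Int) (key : String) :
    ∀ (l : List String) (c : Int),
      l.foldl (fun count key2 => if key == key2 then count else count + g key2) c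
        = c + (l.map (fun k2 => if key == k2 then 0 else g k2)).sum := by
  intro l
  induction l with
  | nil => simp
  | cons x xs ih =>
      intro c
      rw [List.foldl_cons, List.map_cons, List.sum_cons]
      by_cases h : (key == x) = true
      · rw [if_pos h, if_pos h, ih]; ring
      · rw [if_neg h, if_neg h, ih]; ring

-- zeroing out the unique occurrence of key subtracts g key from the sum
theorem sum_zero_key (g : String → Int) (key : String) :
    ∀ (l : List String), l.Nodup → key ∈ l →
      (l.map (fun k2 => if key == k2 then 0 else g k2)).sum = (l.map g).sum - g key := by
  intro l
  induction l with
  | nil => intro _ h; simp at h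
  | cons x xs ih =>
      intro hnd hmem
      rcases List.nodup_cons.mp hnd with ⟨hx, hxs⟩
      rw [List.map_cons, List.sum_cons, List.map_cons, List.sum_cons]
      rcases List.mem_cons.mp hmem with h | h
      · subst h
        rw [if_pos (by simp)]
        have hrest : (xs.map (fun k2 => if key == k2 then 0 else g k2)) = xs.map g := by
          apply List.map_congr_left
          intro y hy
          have : key ≠ y := fun he => hx (he ▸ hy)
          simp [this]
        rw [hrest]; ring
      · have hne : key ≠ x := fun he => (he ▸ hx) h
        rw [if_neg (by simp [hne]), ih hxs h]; ring

-- all over a list respects pointwise-on-members equality of predicates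
theorem all_congr_mem {α : Type} (f h : α → Bool) :
    ∀ (l : List α), (∀ x ∈ l, f x = h x) → l.all f = l.all h := by
  intro l
  induction l with
  | nil => intro _; rfl
  | cons a t ih =>
      intro H
      simp only [List.all_cons, H a (List.mem_cons_self ..),
        ih (fun x hx => H x (List.mem_cons_of_mem _ hx))]

-- A's early-return loop is an `all`
theorem aLoop_eq_all (d : PySem.Dict String Int) (k : Int) :
    ∀ (l : List String), aLoop d k l = l.all (fun key => !decide (aInner d key ≤ k)) := by
  intro l
  induction l with
  | nil => rfl
  | cons key rest ih =>
      by_cases h : aInner d key ≤ k <;> simp [aLoop, h, ih]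

-- A's inner sum for a key of the dict equals total minus that key's value
theorem aInner_eq_total_sub (d : PySem.Dict String Int) (key : String)
    (hnd : d.keys.Nodup) (hmem : key ∈ d.keys) :
    aInner d key = (d.keys.map (fun k2 => d.getD k2 0)).sum - d.getD key 0 := by
  unfold aInner
  rw [aInner_foldl_sum (fun k2 => d.getD k2 0) key d.keys 0,
      sum_zero_key (fun k2 => d.getD k2 0) key d.keys hnd hmem]
  ring

-- ===== VERDICT (by name: the statement is the Claim_ definition above) =====
theorem allMoreThanK_spec : Claim_equal_allMoreThanK := by
  intro m k _
  unfold Spec_allMoreThanK allMoreThanK allMoreThanK_alt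
  have hnd : (PySem.Dict.ofList m).keys.Nodup := PySem.Dict.nodup_keys_ofList m
  set d := PySem.Dict.ofList m with hd
  have hvals : d.values = d.keys.map (fun k2 => d.getD k2 0) :=
    PySem.Dict.values_eq_map_keys d hnd 0
  have htot : (d.keys.map (fun k2 => d.getD k2 0)).foldl (· + ·) 0
      = (d.keys.map (fun k2 => d.getD k2 0)).sum := List.sum_eq_foldl.symm
  simp only [hvals, List.all_map, aLoop_eq_all]
  apply all_congr_mem
  intro key hkey
  simp only [Function.comp, htot, aInner_eq_total_sub d key hnd hkey,
    ← decide_not, decide_eq_decide]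
  omega
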